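-- pv_equiv track=rewrite | github.com/MelisandeAllain/Project0-LyM | Project0-202516479/parser/utils.py | find_proc
-- ===== SOURCE A (Python) =====
-- def find_proc(txt, indice):
--     """
--     Same as before but specifically for 'proc' in procedure declarations
--
--     :param txt
--     :param indice: the index position in where the function should start looking for the word "proc"
--
--     :return: tuple containing the index of the character after the
--      proc or False
--     """
--     var = ""
--     if txt[indice] == ":": return False
--     while txt[indice] != ":" and txt[indice] != "[":
--         var +=(txt[indice])
--         indice+=1
--     if txt[indice] == ":":
--         param = True
--     else:
--         param = False
--     return (var, indice, param)
-- ===== SOURCE B (Python) =====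
-- def find_proc(txt, indice):
--     if txt[indice] == ":":
--         return False
--     end = min(p for p in (txt.find(":", indice), txt.find("[", indice)) if p != -1)
--     return (txt[indice:end], end, txt[end] == ":")
-- ===== Notes on version B (the rewrite author's own statement) =====
-- stated objective: idiomatic
-- what changed: Replaces the accumulating character-by-character while loop with a locate-then-slice decomposition: str.find locates the first ':' and '[' after indice and the result is a single slice up to the nearer hit; Pre_ excludes inputs where A raises, where A returns False (not a tuple), and negative indice where A's index mixes wraparound with forward scanning.
-- outside the precondition, e.g. on find_proc('a[', -1): A returns ('', -1, False), B returns ('', 1, False); on find_proc(':x', 0): A returns False, B returns False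
import Mathlib
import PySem

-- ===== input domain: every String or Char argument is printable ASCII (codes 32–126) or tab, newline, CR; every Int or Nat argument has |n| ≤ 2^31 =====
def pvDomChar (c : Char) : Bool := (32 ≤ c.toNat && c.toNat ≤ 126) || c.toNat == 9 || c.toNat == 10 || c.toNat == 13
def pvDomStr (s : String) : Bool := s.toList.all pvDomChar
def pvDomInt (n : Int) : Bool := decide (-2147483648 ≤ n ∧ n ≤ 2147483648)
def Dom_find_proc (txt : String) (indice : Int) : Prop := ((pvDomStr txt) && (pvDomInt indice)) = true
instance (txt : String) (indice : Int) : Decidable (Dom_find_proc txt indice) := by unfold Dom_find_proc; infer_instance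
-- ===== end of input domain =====

-- B replaces A's accumulating character-by-character while loop by a locate-then-slice
-- decomposition (find the first ':' / '[' after indice, slice up to the nearer hit); same values.


-- ===== PORT A =====
-- the while loop: fuel bounds the iteration count ((len - indice) + 1 always suffices, see
-- findProcGoA_eq below); `none` is exactly Python's IndexError when the scan runs off the string
def findProcGoA (cs : List Char) (fuel : Nat) (var : List Char) (i : Int) :
    Option (String × Int × Bool) :=
  match fuel with
  | 0 => none
  | fuel + 1 =>
    match PySem.Chars.pyGet? cs i with
    | none => none
    | some c =>
      if c ≠ ':' ∧ c ≠ '[' then findProcGoA cs fuel (var ++ [c]) (i + 1)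
      else some (String.ofList var, i, c == ':')

-- Python returns False (not a tuple) when txt[indice] == ':'; that input is outside Pre_ and
-- the port returns none there, as it does where Python raises IndexError
def find_proc (txt : String) (indice : Int) : Option (String × Int × Bool) :=
  match PySem.Str.pyGet? txt indice with
  | none => none
  | some c =>
    if c = ':' then none
    else findProcGoA txt.toList (((txt.toList.length : Int) - indice).toNat + 1) [] indice

-- ===== PORT B =====
def find_proc_alt (txt : String) (indice : Int) : Option (String × Int × Bool) :=
  match PySem.Str.pyGet? txt indice with
  | none => none
  | some c0 =>
    if c0 = ':' then none
    else
      let c := PySem.Str.findFrom txt ":" indice none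
      let b := PySem.Str.findFrom txt "[" indice none
      -- min over the generator of non-(-1) positions; empty generator = ValueError = none
      if c = -1 ∧ b = -1 then none
      else
        let e : Int := if c = -1 then b else if b = -1 then c else min c b
        match PySem.Str.pyGet? txt e with
        | none => none
        | some ce => some (String.ofList (PySem.Chars.slice txt.toList (some indice) (some e)), e, ce == ':')

-- ===== PRECONDITION & SPEC =====
-- Pre_ excludes: inputs where A raises IndexError (indice out of range, or no ':'/'[' at or
-- after it); indice pointing at ':' where A returns False, which is not a value of the declared
-- tuple type; and negative indice, on which A's result index is a negative-index wraparound
-- artefact of mixing negative indexing with the increasing scan.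
def Pre_find_proc (txt : String) (indice : Int) : Prop :=
  0 ≤ indice ∧ indice < (txt.toList.length : Int) ∧
  txt.toList.getD indice.toNat ' ' ≠ ':' ∧
  ((txt.toList.drop indice.toNat).any (fun c => c == ':' || c == '[')) = true
instance (txt : String) (indice : Int) : Decidable (Pre_find_proc txt indice) := by
  unfold Pre_find_proc; infer_instance
def pvWitness_find_proc : String × Int := ("proc[", 0)
def Spec_find_proc (txt : String) (indice : Int) (out : Option (String × Int × Bool)) : Prop := out = find_proc_alt txt indice
instance (txt : String) (indice : Int) (out : Option (String × Int × Bool)) : Decidable (Spec_find_proc txt indice out) := by unfold Spec_find_proc; infer_instance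

-- ===== CLAIM (what is proved, stated in full; the proofs are below) =====
def Claim_equal_find_proc : Prop := ∀ (txt : String) (indice : Int), Dom_find_proc txt indice → Pre_find_proc txt indice → Spec_find_proc txt indice (find_proc txt indice)

-- ===== LEMMAS AND PROOFS =====

-- the stop predicate of A's while loop
def pvStop (c : Char) : Bool := c == ':' || c == '['

-- A's loop, characterised by the first stop position in the remaining suffix
theorem findProcGoA_eq (cs : List Char) (fuel : Nat) (var : List Char) (i : Nat)
    (hle : i ≤ cs.length) (hfuel : cs.length - i < fuel) :
    findProcGoA cs fuel var (i : Int) =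
      match (cs.drop i).findIdx? pvStop with
      | none => none
      | some k => some (String.ofList (var ++ (cs.drop i).take k), ((i + k : Nat) : Int),
                        (cs.drop i).getD k ' ' == ':') := by
  induction fuel generalizing var i with
  | zero => omega
  | succ fuel ih =>
    rcases lt_or_eq_of_le hle with hlt | heq
    · have hdrop : cs.drop i = cs[i] :: cs.drop (i + 1) := List.drop_eq_getElem_cons hlt
      have hget : PySem.Chars.pyGet? cs (i : Int) = some cs[i] := by
        simp [PySem.Chars.pyGet?, hlt]
      by_cases hstop : pvStop cs[i]
      · have hne : ¬ (cs[i] ≠ ':' ∧ cs[i] ≠ '[') := by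
          simp only [pvStop, Bool.or_eq_true, beq_iff_eq] at hstop; tauto
        simp only [findProcGoA, hget, if_neg hne, hdrop, List.findIdx?_cons, hstop, if_pos]
        simp [List.getElem?_eq_getElem hlt]
      · have hyes : cs[i] ≠ ':' ∧ cs[i] ≠ '[' := by
          simp only [pvStop, Bool.or_eq_true, beq_iff_eq] at hstop; tauto
        have hcast : (i : Int) + 1 = ((i + 1 : Nat) : Int) := by push_cast; ring
        simp only [findProcGoA, hget, if_pos hyes, hcast]
        rw [ih (var ++ [cs[i]]) (i + 1) (by omega) (by omega), hdrop, List.findIdx?_cons,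
          if_neg hstop]
        cases hrec : (cs.drop (i + 1)).findIdx? pvStop with
        | none => simp
        | some k =>
          have hkk : i + 1 + k = i + (k + 1) := by omega
          simp only [Option.map_some, List.take_succ_cons, List.getD_cons_succ, hkk,
            List.append_assoc, List.singleton_append]
    · have hnone : cs[i]? = none := List.getElem?_eq_none (by omega)
      have hdrop : cs.drop i = [] := by rw [heq]; simp
      simp [findProcGoA, hnone, hdrop]

-- [ch] is a prefix of l iff l starts with ch
theorem singleton_prefix_iff_head? (l : List Char) (ch : Char) :
    [ch] <+: l ↔ l.head? = some ch := by
  cases l with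
  | nil => simp
  | cons a t => simp [List.cons_prefix_cons, eq_comm]

-- Chars.find for a single-character needle is findIdx? of equality with that character
theorem find_singleton_eq (ds : List Char) (ch : Char) :
    PySem.Chars.find ds [ch] =
      match ds.findIdx? (fun c => c == ch) with
      | none => (-1 : Int)
      | some k => (k : Int) := by
  cases hidx : ds.findIdx? (fun c => c == ch) with
  | none =>
    have hmem : ch ∉ ds := by
      intro hm
      have := (List.findIdx?_eq_none_iff.mp hidx) ch hm
      simp at this
    have : ¬ [ch] <:+: ds := fun h => hmem ((List.singleton_infix_iff ch ds).mp h)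
    simpa using (PySem.Chars.find_eq_neg_one_iff ds [ch]).mpr this
  | some k =>
    obtain ⟨hk, hpk, hmin⟩ := List.findIdx?_eq_some_iff_getElem.mp hidx
    have hch : ds[k] = ch := by simpa using hpk
    have hinfix : [ch] <:+: ds := (List.singleton_infix_iff ch ds).mpr (hch ▸ List.getElem_mem hk)
    have hnn : 0 ≤ PySem.Chars.find ds [ch] := (PySem.Chars.find_nonneg_iff ds [ch]).mpr hinfix
    obtain ⟨hpre, hfirst⟩ := PySem.Chars.find_spec (s := ds) (sub := [ch]) hnn
    set t := (PySem.Chars.find ds [ch]).toNat with ht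
    have hpre' : ds[t]? = some ch := by
      have := (singleton_prefix_iff_head? _ ch).mp hpre
      rwa [List.head?_drop] at this
    have htlen : t < ds.length := by
      obtain ⟨h, -⟩ := List.getElem?_eq_some_iff.mp hpre'
      exact h
    have htk : t = k := by
      rcases lt_trichotomy t k with h | h | h
      · have hne := hmin t h
        have : ds[t] = ch := by
          have := (ds.getElem?_eq_getElem htlen).symm.trans hpre'
          simpa using this
        simp [this] at hne
      · exact h
      · exact absurd (hfirst k h) (by
          rw [singleton_prefix_iff_head?, List.head?_drop, ds.getElem?_eq_getElem hk, hch]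
          simp)
    have hfind : PySem.Chars.find ds [ch] = (k : Int) := by omega
    simp [hfind]

theorem find_singleton_none (ds : List Char) (ch : Char)
    (h : List.findIdx? (fun c => c == ch) ds = none) : PySem.Chars.find ds [ch] = -1 := by
  rw [find_singleton_eq ds ch, h]

theorem find_singleton_some (ds : List Char) (ch : Char) (k : Nat)
    (h : List.findIdx? (fun c => c == ch) ds = some k) : PySem.Chars.find ds [ch] = (k : Int) := by
  rw [find_singleton_eq ds ch, h]

-- selection of the end position in B: both finds cannot be -1, and the chain picks i + k,
-- the first stop position
theorem endsel_eq (ds : List Char) (i k : Nat) (hp : List.findIdx? pvStop ds = some k)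
    (c b : Int)
    (hc : c = if PySem.Chars.find ds [':'] = -1 then -1 else (i : Int) + PySem.Chars.find ds [':'])
    (hb : b = if PySem.Chars.find ds ['['] = -1 then -1 else (i : Int) + PySem.Chars.find ds ['[']) :
    ¬ (c = -1 ∧ b = -1) ∧
      (if c = -1 then b else if b = -1 then c else min c b) = ((i + k : Nat) : Int) := by
  obtain ⟨hk, hpk, hmin⟩ := List.findIdx?_eq_some_iff_getElem.mp hp
  have hkor : ds[k] = ':' ∨ ds[k] = '[' := by
    simp only [pvStop, Bool.or_eq_true, beq_iff_eq] at hpk; exact hpk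
  rcases hkor with h | h
  · have hkc : List.findIdx? (fun c => c == ':') ds = some k := by
      refine List.findIdx?_eq_some_iff_getElem.mpr ⟨hk, by simp [h], fun j hj => ?_⟩
      have := hmin j hj
      simp only [pvStop, Bool.or_eq_true, beq_iff_eq] at this ⊢
      tauto
    rw [find_singleton_some ds ':' k hkc, if_neg (by omega)] at hc
    cases hkb : List.findIdx? (fun c => c == '[') ds with
    | none =>
      rw [find_singleton_none ds '[' hkb, if_pos rfl] at hb
      constructor
      · omega
      · split_ifs <;> omega
    | some kb =>
      obtain ⟨hkb1, hkb2, hkb3⟩ := List.findIdx?_eq_some_iff_getElem.mp hkb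
      have hkbe : ds[kb] = '[' := by simpa using hkb2
      have hklt : k < kb := by
        rcases lt_trichotomy kb k with hlt | heq | hgt
        · have := hmin kb hlt
          simp [pvStop, hkbe] at this
        · exfalso; subst heq; rw [h] at hkbe; exact absurd hkbe (by decide)
        · exact hgt
      rw [find_singleton_some ds '[' kb hkb, if_neg (by omega)] at hb
      constructor
      · omega
      · split_ifs <;> omega
  · have hkb : List.findIdx? (fun c => c == '[') ds = some k := by
      refine List.findIdx?_eq_some_iff_getElem.mpr ⟨hk, by simp [h], fun j hj => ?_⟩
      have := hmin j hj
      simp only [pvStop, Bool.or_eq_true, beq_iff_eq] at this ⊢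
      tauto
    rw [find_singleton_some ds '[' k hkb, if_neg (by omega)] at hb
    cases hkc : List.findIdx? (fun c => c == ':') ds with
    | none =>
      rw [find_singleton_none ds ':' hkc, if_pos rfl] at hc
      constructor
      · omega
      · split_ifs; omega
    | some kc =>
      obtain ⟨hkc1, hkc2, hkc3⟩ := List.findIdx?_eq_some_iff_getElem.mp hkc
      have hkce : ds[kc] = ':' := by simpa using hkc2
      have hklt : k < kc := by
        rcases lt_trichotomy kc k with hlt | heq | hgt
        · have := hmin kc hlt
          simp [pvStop, hkce] at this
        · exfalso; subst heq; rw [h] at hkce; exact absurd hkce (by decide)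
        · exact hgt
      rw [find_singleton_some ds ':' kc hkc, if_neg (by omega)] at hc
      constructor
      · omega
      · split_ifs <;> omega

-- ===== VERDICT (by name: the statement is the Claim_ definition above) =====
theorem find_proc_spec : Claim_equal_find_proc := by
  intro txt indice hDom hPre
  obtain ⟨h0, hltI, hneD, hex⟩ := hPre
  unfold Spec_find_proc
  obtain ⟨i, rfl⟩ : ∃ i : Nat, indice = (i : Int) :=
    ⟨indice.toNat, (Int.toNat_of_nonneg h0).symm⟩
  have hilt : i < txt.toList.length := by exact_mod_cast hltI
  have hne : txt.toList[i] ≠ ':' := by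
    rwa [Int.toNat_natCast, List.getD_eq_getElem _ _ hilt] at hneD
  have hgetS : PySem.Str.pyGet? txt (i : Int) = some txt.toList[i] := by
    simp [List.getElem?_eq_getElem hilt]
  -- existence of a stop character gives the first stop position k
  obtain ⟨k, hp⟩ : ∃ k, List.findIdx? pvStop (txt.toList.drop i) = some k := by
    rw [Int.toNat_natCast] at hex
    cases hfi : List.findIdx? pvStop (txt.toList.drop i) with
    | some k => exact ⟨k, rfl⟩
    | none =>
      obtain ⟨c, hcm, hcp⟩ := List.any_eq_true.mp hex
      have := List.findIdx?_eq_none_iff.mp hfi c hcm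
      simp only [pvStop] at this
      rw [this] at hcp
      exact absurd hcp (by simp)
  obtain ⟨hk, hpk, -⟩ := List.findIdx?_eq_some_iff_getElem.mp hp
  have hfuel : txt.toList.length - i < (((txt.toList.length : Int) - (i : Int)).toNat + 1) := by
    omega
  have hik : i + k < txt.toList.length := by
    have := List.length_drop (l := txt.toList) (i := i)
    omega
  -- evaluate A
  have hA : find_proc txt (i : Int) =
      some (String.ofList ((txt.toList.drop i).take k), ((i + k : Nat) : Int),
        (txt.toList.drop i)[k] == ':') := by
    unfold find_proc
    rw [hgetS]
    simp only [if_neg hne]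
    rw [findProcGoA_eq txt.toList _ [] i (by omega) hfuel, hp]
    simp [List.getElem?_eq_getElem hik]
  -- evaluate B
  have hcolon : (":" : String).toList = [':'] := by decide
  have hbrack : ("[" : String).toList = ['['] := by decide
  have hfc : PySem.Str.findFrom txt ":" (i : Int) none =
      (if PySem.Chars.find (txt.toList.drop i) [':'] = -1 then -1
       else (i : Int) + PySem.Chars.find (txt.toList.drop i) [':']) := by
    rw [PySem.Str.findFrom_eq, hcolon, PySem.Chars.findFrom_natCast _ _ i (by omega)]
  have hfb : PySem.Str.findFrom txt "[" (i : Int) none =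
      (if PySem.Chars.find (txt.toList.drop i) ['['] = -1 then -1
       else (i : Int) + PySem.Chars.find (txt.toList.drop i) ['[']) := by
    rw [PySem.Str.findFrom_eq, hbrack, PySem.Chars.findFrom_natCast _ _ i (by omega)]
  obtain ⟨hnotboth, hsel⟩ := endsel_eq (txt.toList.drop i) i k hp _ _ hfc hfb
  have hgetE : PySem.Str.pyGet? txt (((i + k : Nat) : Int)) = some (txt.toList.drop i)[k] := by
    rw [PySem.Str.pyGet?_natCast, List.getElem?_eq_getElem hik]
    congr 1
    rw [List.getElem_drop]
  have hslice : PySem.Chars.slice txt.toList (some (i : Int)) (some ((i + k : Nat) : Int)) =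
      (txt.toList.drop i).take k := by
    show PySem.List.slice txt.toList (some (i : Int)) (some ((i + k : Nat) : Int)) =
      (txt.toList.drop i).take k
    rw [PySem.List.slice_natCast]
    congr 1
    omega
  have hB : find_proc_alt txt (i : Int) =
      some (String.ofList ((txt.toList.drop i).take k), ((i + k : Nat) : Int),
        (txt.toList.drop i)[k] == ':') := by
    unfold find_proc_alt
    rw [hgetS]
    simp only [if_neg hne]
    rw [if_neg hnotboth, hsel, hgetE, hslice]
  rw [hA, hB]
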